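-- pv_equiv track=rewrite | github.com/Olani2b/SSE_24_Mobility_Behavior_Monitoring | evaluation_system/model/evaluation_report.py | _calculate_max_consecutive_errors
-- ===== SOURCE A (Python) =====
-- def _calculate_max_consecutive_errors(labels):
--     max_streak = 0
--     current_streak = 0
--     for label in labels:
--         if label["expert_label"] != label["classifier_label"]:
--             current_streak += 1
--             max_streak = max(max_streak, current_streak)
--         else:
--             current_streak = 0
--     return max_streak
-- ===== SOURCE B (Python) =====
-- def _calculate_max_consecutive_errors(labels):
--     # Run segmentation: build the mismatch flags once, then scan runs of True
--     # with two indices and keep the longest run length.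
--     flags = [label["expert_label"] != label["classifier_label"] for label in labels]
--     best = 0
--     i = 0
--     n = len(flags)
--     while i < n:
--         if flags[i]:
--             j = i + 1
--             while j < n and flags[j]:
--                 j += 1
--             if j - i > best:
--                 best = j - i
--             i = j
--         else:
--             i += 1
--     return best
-- ===== Notes on version B (the rewrite author's own statement) =====
-- stated objective: alternative
-- what changed: Replaces the rolling current/max streak counters with run segmentation: a mismatch-flag list is built once, then runs of consecutive mismatches are located with two indices and the longest run length is returned.
import Mathlib
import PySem

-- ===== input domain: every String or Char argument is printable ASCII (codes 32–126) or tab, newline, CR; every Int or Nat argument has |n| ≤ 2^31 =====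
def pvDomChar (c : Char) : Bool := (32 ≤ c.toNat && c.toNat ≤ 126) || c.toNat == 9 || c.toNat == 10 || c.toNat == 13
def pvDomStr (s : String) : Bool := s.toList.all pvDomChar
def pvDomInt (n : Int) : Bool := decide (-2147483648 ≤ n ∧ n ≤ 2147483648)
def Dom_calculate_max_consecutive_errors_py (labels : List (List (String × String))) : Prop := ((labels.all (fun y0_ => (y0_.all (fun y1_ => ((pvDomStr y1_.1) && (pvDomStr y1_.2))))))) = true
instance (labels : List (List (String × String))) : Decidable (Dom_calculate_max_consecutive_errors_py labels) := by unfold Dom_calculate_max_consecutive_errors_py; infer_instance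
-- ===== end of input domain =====

-- B replaces A's rolling streak counters by run segmentation over a mismatch-flag list
-- (alternative decomposition, same cost); equivalence is proved on inputs where both keys exist.

-- ===== PORT A =====
-- literal transliteration of A's for-loop with (max_streak, current_streak) state
def calculate_max_consecutive_errors_py (labels : List (List (String × String))) : Int :=
  (labels.foldl
    (fun st label =>
      if PySem.Dict.getD (PySem.Dict.mk label) "expert_label" "" ≠ PySem.Dict.getD (PySem.Dict.mk label) "classifier_label" ""
      then (max st.1 (st.2 + 1), st.2 + 1)
      else (st.1, 0))
    ((0 : Int), (0 : Int))).1

-- ===== PORT B =====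
-- the mismatch flag of one label dict (B's list-comprehension predicate)
def pvMismatch (label : List (String × String)) : Bool :=
  decide (PySem.Dict.getD (PySem.Dict.mk label) "expert_label" "" ≠ PySem.Dict.getD (PySem.Dict.mk label) "classifier_label" "")

-- B's outer while-loop: skip a False flag, or consume a whole run of True flags
-- (the inner while j < n and flags[j]) and keep the larger of its length and the rest's best.
def pvLongestRun : List Bool → Int
  | [] => 0
  | false :: t => pvLongestRun t
  | true :: t =>
      max (1 + ((t.takeWhile (fun b => b)).length : Int))
          (pvLongestRun (t.dropWhile (fun b => b)))
  termination_by l => l.length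
  decreasing_by
    · simp
    · simpa using Nat.lt_succ_of_le (List.length_dropWhile_le _ _)

def calculate_max_consecutive_errors_py_alt (labels : List (List (String × String))) : Int :=
  pvLongestRun (labels.map pvMismatch)

-- ===== PRECONDITION & SPEC =====
-- Pre_ excludes exactly the inputs where some label dict lacks one of the two keys:
-- there Python A raises KeyError (and Python B raises KeyError too).
def Pre_calculate_max_consecutive_errors_py (labels : List (List (String × String))) : Prop :=
  ∀ label ∈ labels, (PySem.Dict.get? (PySem.Dict.mk label) "expert_label").isSome = true ∧
                    (PySem.Dict.get? (PySem.Dict.mk label) "classifier_label").isSome = true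
instance (labels : List (List (String × String))) : Decidable (Pre_calculate_max_consecutive_errors_py labels) := by unfold Pre_calculate_max_consecutive_errors_py; infer_instance

def pvWitness_calculate_max_consecutive_errors_py : (List (List (String × String))) :=
  [[("expert_label", "walk"), ("classifier_label", "run")],
   [("expert_label", "walk"), ("classifier_label", "walk")]]

def Spec_calculate_max_consecutive_errors_py (labels : List (List (String × String))) (out : Int) : Prop := out = calculate_max_consecutive_errors_py_alt labels
instance (labels : List (List (String × String))) (out : Int) : Decidable (Spec_calculate_max_consecutive_errors_py labels out) := by unfold Spec_calculate_max_consecutive_errors_py; infer_instance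

-- ===== CLAIM (what is proved, stated in full; the proofs are below) =====
def Claim_equal_calculate_max_consecutive_errors_py : Prop := ∀ (labels : List (List (String × String))), Dom_calculate_max_consecutive_errors_py labels → Pre_calculate_max_consecutive_errors_py labels → Spec_calculate_max_consecutive_errors_py labels (calculate_max_consecutive_errors_py labels)

-- ===== LEMMAS AND PROOFS =====

-- A's loop body, restated on the boolean mismatch flag
def pvStepA (st : Int × Int) : Bool → Int × Int
  | true => (max st.1 (st.2 + 1), st.2 + 1)
  | false => (st.1, 0)

theorem pvPortA_eq_flags (labels : List (List (String × String))) :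
    calculate_max_consecutive_errors_py labels
      = ((labels.map pvMismatch).foldl pvStepA ((0 : Int), (0 : Int))).1 := by
  unfold calculate_max_consecutive_errors_py
  rw [List.foldl_map]
  have hf : (fun (st : Int × Int) (label : List (String × String)) =>
      if PySem.Dict.getD (PySem.Dict.mk label) "expert_label" ""
          ≠ PySem.Dict.getD (PySem.Dict.mk label) "classifier_label" ""
      then (max st.1 (st.2 + 1), st.2 + 1) else (st.1, 0))
      = fun st label => pvStepA st (pvMismatch label) := by
    funext st label
    by_cases h : PySem.Dict.getD (PySem.Dict.mk label) "expert_label" ""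
        ≠ PySem.Dict.getD (PySem.Dict.mk label) "classifier_label" ""
    · simp [pvMismatch, pvStepA, h]
    · simp [pvMismatch, pvStepA, h]
  rw [hf]

-- the max_streak accumulator factors out of the fold
theorem pvFold_factor (t : List Bool) : ∀ (m c : Int), 0 ≤ m → 0 ≤ c →
    (t.foldl pvStepA (m, c)).1 = max m ((t.foldl pvStepA (0, c)).1) := by
  induction t with
  | nil => intro m c hm _; simpa using by omega
  | cons b t ih =>
      intro m c hm hc
      cases b with
      | false =>
          simp only [List.foldl_cons, pvStepA]
          rw [ih m 0 hm le_rfl]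
      | true =>
          simp only [List.foldl_cons, pvStepA]
          rw [ih (max m (c + 1)) (c + 1) (by omega) (by omega),
              ih (max 0 (c + 1)) (c + 1) (by omega) (by omega)]
          omega

-- run-segmentation invariant: with streak c already recorded, the fold's best equals
-- c extended by the leading run of True versus the best of the remainder;
-- and at c = 0 the fold equals pvLongestRun.
theorem pvFold_runs (t : List Bool) :
    (∀ c : Int, 0 ≤ c →
      max c ((t.foldl pvStepA (0, c)).1)
        = max (c + ((t.takeWhile (fun b => b)).length : Int))
              (pvLongestRun (t.dropWhile (fun b => b)))) ∧
    ((t.foldl pvStepA ((0 : Int), (0 : Int))).1 = pvLongestRun t) := by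
  induction t with
  | nil =>
      refine ⟨fun c hc => ?_, by simp [pvLongestRun]⟩
      simp only [List.foldl_nil, List.takeWhile_nil, List.dropWhile_nil, pvLongestRun,
        List.length_nil, Int.natCast_zero, add_zero]
      try omega
  | cons b t ih =>
      cases b with
      | false =>
          refine ⟨fun c hc => ?_, ?_⟩
          · simp only [List.foldl_cons, pvStepA, List.takeWhile_cons, List.dropWhile_cons]
            simp only [Bool.false_eq_true, if_false]
            simp [pvLongestRun, ih.2]
          · simpa [pvStepA, pvLongestRun] using ih.2
      | true =>
          have key : ∀ c : Int, 0 ≤ c →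
              max c (((true :: t).foldl pvStepA (0, c)).1)
                = max (c + (((true :: t).takeWhile (fun b => b)).length : Int))
                      (pvLongestRun ((true :: t).dropWhile (fun b => b))) := by
            intro c hc
            simp only [List.foldl_cons, pvStepA, List.takeWhile_cons, List.dropWhile_cons, if_true]
            rw [pvFold_factor t (max 0 (c + 1)) (c + 1) (by omega) (by omega)]
            have h1 := ih.1 (c + 1) (by omega)
            have hlen : (((true :: t.takeWhile (fun b => b)).length : Int))
                = ((t.takeWhile (fun b => b)).length : Int) + 1 := by
              simp [List.length_cons]
            omega
          refine ⟨key, ?_⟩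
          have h0 := key 0 le_rfl
          have hmax : max (0 : Int) (((true :: t).foldl pvStepA (0, 0)).1)
              = ((true :: t).foldl pvStepA ((0 : Int), (0 : Int))).1 := by
            simp only [List.foldl_cons, pvStepA]
            rw [pvFold_factor t (max 0 (0 + 1)) (0 + 1) (by omega) (by omega)]
            omega
          rw [hmax] at h0
          rw [h0]
          simp only [pvLongestRun, List.takeWhile_cons, List.dropWhile_cons, if_true]
          have hlen : (((true :: t.takeWhile (fun b => b)).length : Int))
              = ((t.takeWhile (fun b => b)).length : Int) + 1 := by
            simp [List.length_cons]
          omega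

-- ===== VERDICT (by name: the statement is the Claim_ definition above) =====
theorem calculate_max_consecutive_errors_py_spec : Claim_equal_calculate_max_consecutive_errors_py := by
  intro labels _ _
  unfold Spec_calculate_max_consecutive_errors_py calculate_max_consecutive_errors_py_alt
  rw [pvPortA_eq_flags]
  exact (pvFold_runs (labels.map pvMismatch)).2
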